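-- pv_equiv track=rewrite | github.com/saitamashigoto/algo | diwali.py | lights
-- ===== SOURCE A (Python) =====
-- def lights(n):
--     if n == 1:
--         return 1
--     if n == 2:
--         return 3
--     i_p = c_n_f = 1
--     counter = 1
--     res_sum = 0
--     i = n
--     if n % 2 == 0:
--         limit = n // 2 - 1
--     else:
--         limit = (n - 1) // 2
--
--     while counter <= limit:
--         i_p *= i
--         c_n_f *= counter
--         counter += 1
--         i -= 1
--         res_sum += (i_p // c_n_f)
--     res_sum *= 2
--     res_sum += 1
--
--     if n % 2 == 0:
--         res_sum += (i_p * (n//2 +1)) // (c_n_f * n // 2)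
--
--     return res_sum % (10**5)
-- ===== SOURCE B (Python) =====
-- def lights(n):
--     # number of ways = 2^n - 1 (mod 10^5), by the binomial theorem
--     return (pow(2, n, 100000) - 1) % 100000
-- ===== Notes on version B (the rewrite author's own statement) =====
-- stated objective: faster
-- what changed: Replaces the O(n) big-integer loop summing binomial coefficients by a single modular fast exponentiation pow(2,n,100000), using the identity sum C(n,k) = 2^n.
-- outside the precondition, e.g. on lights(-1): A returns 1, B raises ValueError; on lights(0): A raises ZeroDivisionError, B returns 0
import Mathlib
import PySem

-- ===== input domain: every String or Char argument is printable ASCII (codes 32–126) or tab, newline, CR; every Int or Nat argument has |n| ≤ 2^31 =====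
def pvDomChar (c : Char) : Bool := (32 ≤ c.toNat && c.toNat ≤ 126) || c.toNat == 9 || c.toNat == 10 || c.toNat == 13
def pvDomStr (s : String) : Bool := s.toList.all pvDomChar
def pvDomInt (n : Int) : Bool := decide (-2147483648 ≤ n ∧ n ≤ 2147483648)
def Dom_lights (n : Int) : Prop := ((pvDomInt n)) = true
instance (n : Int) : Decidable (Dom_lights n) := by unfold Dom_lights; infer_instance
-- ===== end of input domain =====

-- B replaces A's O(n) big-integer loop over binomial coefficients by one modular
-- exponentiation pow(2, n, 100000) (sum of binomials = 2^n): objective "faster".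

-- ===== PORT A =====
-- the while loop: state (i_p, c_n_f, counter, i, res_sum); returns (i_p, c_n_f, res_sum)
def lightsLoop (limit i_p c_n_f counter i res_sum : Int) : Int × Int × Int :=
  if counter ≤ limit then
    lightsLoop limit (i_p * i) (c_n_f * counter) (counter + 1) (i - 1)
      (res_sum + PySem.Int.floordiv (i_p * i) (c_n_f * counter))
  else (i_p, c_n_f, res_sum)
termination_by (limit + 1 - counter).toNat
decreasing_by omega

def lights (n : Int) : Int :=
  if n == 1 then 1
  else if n == 2 then 3
  else
    let limit : Int :=
      if PySem.Int.mod n 2 == 0 then PySem.Int.floordiv n 2 - 1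
      else PySem.Int.floordiv (n - 1) 2
    let r := lightsLoop limit 1 1 1 n 0
    let i_p := r.1
    let c_n_f := r.2.1
    let res_sum := r.2.2 * 2 + 1
    let res_sum :=
      if PySem.Int.mod n 2 == 0 then
        res_sum + PySem.Int.floordiv (i_p * (PySem.Int.floordiv n 2 + 1))
                    (PySem.Int.floordiv (c_n_f * n) 2)
      else res_sum
    PySem.Int.mod res_sum (10 ^ 5)

-- ===== PORT B =====
def lights_alt (n : Int) : Int :=
  PySem.Int.mod (PySem.Int.powMod 2 n.toNat 100000 - 1) 100000

-- ===== PRECONDITION & SPEC =====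
-- Pre_ excludes n ≤ 0: at n = 0 A raises ZeroDivisionError; for negative n A's loop
-- never runs and it returns the leftover accumulator (an artefact of the loop setup),
-- while B's pow raises ValueError (the base has no modular inverse).
def Pre_lights (n : Int) : Prop := 1 ≤ n
instance (n : Int) : Decidable (Pre_lights n) := by unfold Pre_lights; infer_instance
def pvWitness_lights : Int := 7

def Spec_lights (n : Int) (out : Int) : Prop := out = lights_alt n
instance (n : Int) (out : Int) : Decidable (Spec_lights n out) := by unfold Spec_lights; infer_instance

-- ===== CLAIM (what is proved, stated in full; the proofs are below) =====
def Claim_equal_lights : Prop := ∀ (n : Int), Dom_lights n → Pre_lights n → Spec_lights n (lights n)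

-- ===== LEMMAS AND PROOFS =====

-- partial sums of the binomial row (including the j = 0 term)
def chooseSum (m k : Nat) : Nat := ∑ j ∈ Finset.range (k + 1), m.choose j

theorem lightsLoop_stop (limit i_p c_n_f counter i res_sum : Int)
    (h : ¬ counter ≤ limit) :
    lightsLoop limit i_p c_n_f counter i res_sum = (i_p, c_n_f, res_sum) := by
  rw [lightsLoop]; simp [h]

-- loop invariant: after k iterations the state is the k-th descending factorial,
-- k!, counter k+1, i = m - k, and the running sum Σ_{1 ≤ j ≤ k} C(m,j)
theorem lightsLoop_inv (m L : Nat) (hL : L ≤ m) :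
    ∀ d k : Nat, k ≤ L → L - k = d →
    lightsLoop (L : Int) ((m.descFactorial k : Nat) : Int) ((k.factorial : Nat) : Int)
        ((k : Int) + 1) ((m : Int) - (k : Int)) (((chooseSum m k : Nat) : Int) - 1)
      = (((m.descFactorial L : Nat) : Int), ((L.factorial : Nat) : Int),
         ((chooseSum m L : Nat) : Int) - 1) := by
  intro d
  induction d with
  | zero =>
    intro k hk hd
    have hkL : k = L := by omega
    subst hkL
    exact lightsLoop_stop _ _ _ _ _ _ (by omega)
  | succ d ih =>
    intro k hk hd
    have hklt : k < L := by omega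
    rw [lightsLoop]
    have hcond : (k : Int) + 1 ≤ (L : Int) := by exact_mod_cast hklt
    simp only [if_pos hcond]
    have hmk : (m : Int) - (k : Int) = ((m - k : Nat) : Int) := by
      have : k ≤ m := by omega
      push_cast [this]; ring
    have hip : ((m.descFactorial k : Nat) : Int) * ((m : Int) - (k : Int))
        = ((m.descFactorial (k + 1) : Nat) : Int) := by
      rw [hmk, Nat.descFactorial_succ]; push_cast; ring
    have hcf : ((k.factorial : Nat) : Int) * ((k : Int) + 1)
        = (((k + 1).factorial : Nat) : Int) := by
      rw [Nat.factorial_succ]; push_cast; ring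
    have hdiv : PySem.Int.floordiv ((m.descFactorial (k + 1) : Nat) : Int)
        (((k + 1).factorial : Nat) : Int)
        = ((m.descFactorial (k + 1) / (k + 1).factorial : Nat) : Int) :=
      PySem.Int.floordiv_natCast _ _
    have hchoose : m.descFactorial (k + 1) / (k + 1).factorial = m.choose (k + 1) :=
      (Nat.choose_eq_descFactorial_div_factorial m (k + 1)).symm
    have hsum : ((chooseSum m k : Nat) : Int) - 1 + ((m.choose (k + 1) : Nat) : Int)
        = ((chooseSum m (k + 1) : Nat) : Int) - 1 := by
      have : chooseSum m (k + 1) = chooseSum m k + m.choose (k + 1) := by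
        simp [chooseSum, Finset.sum_range_succ]
      rw [this]; push_cast; ring
    rw [hip, hcf, hdiv, hchoose, hsum]
    have harg1 : (k : Int) + 1 + 1 = ((k + 1 : Nat) : Int) + 1 := by push_cast; ring
    have harg2 : (m : Int) - (k : Int) - 1 = (m : Int) - ((k + 1 : Nat) : Int) := by
      push_cast; ring
    rw [harg1, harg2]
    exact ih (k + 1) (by omega) (by omega)

-- the even halfway identity: 2·Σ_{j<t} C(2t,j) + C(2t,t) = 2^(2t)
theorem sum_choose_even (t : Nat) :
    2 * (∑ j ∈ Finset.range t, (2 * t).choose j) + (2 * t).choose t = 2 ^ (2 * t) := by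
  have htotal := Nat.sum_range_choose (2 * t)
  have hsplit : ∑ j ∈ Finset.range (2 * t + 1), (2 * t).choose j
      = (∑ j ∈ Finset.range (t + 1), (2 * t).choose j)
        + ∑ j ∈ Finset.Ico (t + 1) (2 * t + 1), (2 * t).choose j := by
    simp only [Finset.range_eq_Ico]
    exact (Finset.sum_Ico_consecutive _ (by omega) (by omega)).symm
  have htail : ∑ j ∈ Finset.Ico (t + 1) (2 * t + 1), (2 * t).choose j
      = ∑ j ∈ Finset.range t, (2 * t).choose j := by
    rw [Finset.sum_Ico_eq_sum_range]
    have h1 : 2 * t + 1 - (t + 1) = t := by omega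
    rw [h1]
    calc ∑ i ∈ Finset.range t, (2 * t).choose (t + 1 + i)
        = ∑ i ∈ Finset.range t, (2 * t).choose (t + 1 + (t - 1 - i)) :=
          (Finset.sum_range_reflect (fun i => (2 * t).choose (t + 1 + i)) t).symm
      _ = ∑ i ∈ Finset.range t, (2 * t).choose i := by
          apply Finset.sum_congr rfl
          intro i hi
          have hi' : i < t := Finset.mem_range.mp hi
          have : t + 1 + (t - 1 - i) = 2 * t - i := by omega
          rw [this]
          exact Nat.choose_symm (by omega)
  have hmid : ∑ j ∈ Finset.range (t + 1), (2 * t).choose j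
      = (∑ j ∈ Finset.range t, (2 * t).choose j) + (2 * t).choose t :=
    Finset.sum_range_succ _ t
  omega


-- A's value for n = m ≥ 3 is (2^m - 1) % 100000
theorem lights_closed (m : Nat) (hm : 3 ≤ m) :
    lights (m : Int) = (((2 ^ m - 1) % 100000 : Nat) : Int) := by
  have h1 : ((m : Int) == 1) = false := by simp; omega
  have h2 : ((m : Int) == 2) = false := by simp; omega
  unfold lights
  rw [h1, h2]
  simp only [Bool.false_eq_true, if_false]
  rcases Nat.even_or_odd m with he | ho
  · -- even: m = 2t, t ≥ 2
    obtain ⟨t, ht⟩ := he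
    have ht2 : m = 2 * t := by omega
    have htge : 2 ≤ t := by omega
    have hmod : PySem.Int.mod (m : Int) 2 = 0 := by
      have h := PySem.Int.mod_natCast m 2
      have hm2 : m % 2 = 0 := by omega
      rw [hm2] at h
      exact_mod_cast h
    have hfd : PySem.Int.floordiv (m : Int) 2 = (t : Int) := by
      have h := PySem.Int.floordiv_natCast m 2
      have hm2 : m / 2 = t := by omega
      rw [hm2] at h
      exact_mod_cast h
    rw [hmod]
    simp only [beq_self_eq_true, if_true]
    have hL : (t - 1 : Nat) ≤ m := by omega
    have hlim : (t : Int) - 1 = ((t - 1 : Nat) : Int) := by omega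
    have hinv := lightsLoop_inv m (t - 1) hL (t - 1) 0 (by omega) (by omega)
    rw [hfd, hlim]
    have hcs0 : chooseSum m 0 = 1 := by simp [chooseSum]
    rw [hcs0] at hinv
    norm_num at hinv
    rw [hinv]
    -- central term
    have hnum : ((m.descFactorial (t - 1) : Nat) : Int) * ((t : Int) + 1)
        = ((m.descFactorial t : Nat) : Int) := by
      have hstep : m.descFactorial t = (m - (t - 1)) * m.descFactorial (t - 1) := by
        conv_lhs => rw [show t = (t - 1) + 1 from by omega]
        rw [Nat.descFactorial_succ]
      have hmt : m - (t - 1) = t + 1 := by omega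
      rw [hstep, hmt]; push_cast; ring
    have hden : PySem.Int.floordiv ((((t - 1).factorial : Nat) : Int) * (m : Int)) 2
        = ((t.factorial : Nat) : Int) := by
      have hmul : (((t - 1).factorial : Nat) : Int) * (m : Int)
          = (((t - 1).factorial * m : Nat) : Int) := by push_cast; ring
      have hfac : t.factorial = t * (t - 1).factorial := by
        conv_lhs => rw [show t = (t - 1) + 1 from by omega]
        rw [Nat.factorial_succ]
        congr 2
        omega
      have hprod : (t - 1).factorial * m = t.factorial * 2 := by
        rw [hfac, ht2]; ring
      have h := PySem.Int.floordiv_natCast ((t - 1).factorial * m) 2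
      have hdd : (t - 1).factorial * m / 2 = t.factorial := by
        rw [hprod, Nat.mul_div_cancel]; omega
      rw [hdd] at h
      rw [hmul]
      exact_mod_cast h
    rw [hnum, hden]
    have hch : PySem.Int.floordiv ((m.descFactorial t : Nat) : Int) ((t.factorial : Nat) : Int)
        = ((m.choose t : Nat) : Int) := by
      rw [PySem.Int.floordiv_natCast]
      congr 1
      exact (Nat.choose_eq_descFactorial_div_factorial m t).symm
    rw [hch]
    -- value: 2·(Σ_{j≤t-1} C - 1) + 1 + C(m,t) = 2^m - 1
    have hval : (((chooseSum m (t - 1) : Nat) : Int) - 1) * 2 + 1 + ((m.choose t : Nat) : Int)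
        = ((2 ^ m - 1 : Nat) : Int) := by
      have hs := sum_choose_even t
      have hcs : chooseSum m (t - 1) = ∑ j ∈ Finset.range t, (2 * t).choose j := by
        unfold chooseSum
        rw [show t - 1 + 1 = t from by omega, ht2]
      have hchm : m.choose t = (2 * t).choose t := by rw [ht2]
      have h1le : 1 ≤ 2 ^ m := Nat.one_le_two_pow
      rw [hcs, hchm]
      have hsInt : 2 * ((∑ j ∈ Finset.range t, (2 * t).choose j : Nat) : Int)
          + (((2 * t).choose t : Nat) : Int) = (2 : Int) ^ (2 * t) := by
        exact_mod_cast hs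
      have hPOW : ((2 ^ m - 1 : Nat) : Int) = 2 ^ (2 * t) - 1 := by
        rw [Nat.cast_sub h1le, ht2]; push_cast; ring
      rw [hPOW]
      linarith [hsInt]
    rw [hval, show ((10 : Int) ^ 5) = ((100000 : Nat) : Int) from by norm_num,
      PySem.Int.mod_natCast]
  · -- odd: m = 2t+1, t ≥ 1
    obtain ⟨t, ht⟩ := ho
    have htge : 1 ≤ t := by omega
    have hmod : PySem.Int.mod (m : Int) 2 = 1 := by
      have h := PySem.Int.mod_natCast m 2
      have hm2 : m % 2 = 1 := by omega
      rw [hm2] at h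
      exact_mod_cast h
    rw [hmod]
    simp only [show ((1 : Int) == 0) = false from rfl, Bool.false_eq_true, if_false]
    have hm1 : (m : Int) - 1 = ((m - 1 : Nat) : Int) := by omega
    have hfd : PySem.Int.floordiv ((m - 1 : Nat) : Int) 2 = (t : Int) := by
      have h := PySem.Int.floordiv_natCast (m - 1) 2
      have hm2 : (m - 1) / 2 = t := by omega
      rw [hm2] at h
      exact_mod_cast h
    rw [hm1, hfd]
    have hL : t ≤ m := by omega
    have hinv := lightsLoop_inv m t hL t 0 (by omega) (by omega)
    have hcs0 : chooseSum m 0 = 1 := by simp [chooseSum]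
    rw [hcs0] at hinv
    norm_num at hinv
    rw [hinv]
    have hval : (((chooseSum m t : Nat) : Int) - 1) * 2 + 1 = ((2 ^ m - 1 : Nat) : Int) := by
      have hs : chooseSum m t = 4 ^ t := by
        unfold chooseSum
        rw [ht]
        exact Nat.sum_range_choose_halfway t
      have h1le : 1 ≤ 2 ^ m := Nat.one_le_two_pow
      have hpow : (2 : Nat) ^ m = 2 * 4 ^ t := by
        rw [ht, pow_succ, pow_mul]
        norm_num
        ring
      push_cast [Nat.cast_sub h1le]
      rw [hs]
      have : ((2 : Int) ^ m) = 2 * 4 ^ t := by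
        have := hpow
        exact_mod_cast congrArg (fun x : Nat => (x : Int)) this
      rw [this]
      push_cast
      ring
    rw [hval, show ((10 : Int) ^ 5) = ((100000 : Nat) : Int) from by norm_num,
      PySem.Int.mod_natCast]

-- B's value for n = m ≥ 1 is also (2^m - 1) % 100000
theorem lights_alt_closed (m : Nat) (_hm : 1 ≤ m) :
    lights_alt (m : Int) = (((2 ^ m - 1) % 100000 : Nat) : Int) := by
  unfold lights_alt
  rw [show ((m : Int)).toNat = m from Int.toNat_natCast m, PySem.Int.powMod_eq]
  have hpow : ((2 : Int) ^ m) = ((2 ^ m : Nat) : Int) := by push_cast; ring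
  rw [hpow, show ((100000 : Int)) = ((100000 : Nat) : Int) from by norm_num,
    PySem.Int.mod_natCast]
  set r := 2 ^ m % 100000 with hr
  have hrlt : r < 100000 := Nat.mod_lt _ (by norm_num)
  have hrpos : 1 ≤ r := by
    by_contra h
    have hr0 : r = 0 := by omega
    have hdvd : 100000 ∣ 2 ^ m := Nat.dvd_of_mod_eq_zero hr0
    have h5 : (5 : Nat) ∣ 2 ^ m := dvd_trans (by norm_num) hdvd
    have h52 : (5 : Nat) ∣ 2 := Nat.Prime.dvd_of_dvd_pow (by norm_num) h5
    omega
  have hsub : ((r : Int) - 1) = ((r - 1 : Nat) : Int) := by omega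
  rw [hsub, PySem.Int.mod_natCast]
  congr 1
  have h1le : 1 ≤ 2 ^ m := Nat.one_le_two_pow
  omega

-- ===== VERDICT (by name: the statement is the Claim_ definition above) =====
theorem lights_spec : Claim_equal_lights := by
  intro n _ hpre
  unfold Spec_lights
  have hn : 1 ≤ n := hpre
  obtain ⟨m, hm⟩ : ∃ m : Nat, n = (m : Int) := ⟨n.toNat, by omega⟩
  subst hm
  have hm1 : 1 ≤ m := by exact_mod_cast hn
  rcases Nat.lt_or_ge m 3 with h3 | h3
  · interval_cases m
    · decide
    · decide
  · rw [lights_closed m h3, lights_alt_closed m (by omega)]
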